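-- pv_equiv track=rewrite | github.com/debipe20/c-vision | src/amazon/systems-development-engineer-tech-deploy-systems-integration/jump-to-the-end.py | max_jumps_to_end
-- ===== SOURCE A (Python) =====
-- def max_jumps_to_end(arr):
--     n = len(arr)
--     memo = {}
--
--     def dfs(i):
--         if i == n - 1:
--             return 0  # Reached end, no more jumps
--         if i in memo:
--             return memo[i]
--
--         max_jumps = -1  # Start with invalid case
--         for j in range(i + 1, min(n, i + arr[i] + 1)): #j ranges from i+1 to i + arr[i] (but not exceeding n).
--             sub_jumps = dfs(j) #Recursively compute max jumps needed from index j.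
--             if sub_jumps != -1:
--                 max_jumps = max(max_jumps, 1 + sub_jumps) # If we can reach the end from j, update the max jumps at index i. 1 + sub_jumps: one jump to reach j, plus whatever it takes from there to the end.
--
--         memo[i] = max_jumps
--         return max_jumps
--
--     result = dfs(0)
--     return result
-- ===== SOURCE B (Python) =====
-- def max_jumps_to_end(arr):
--     n = len(arr)
--     dp = [-1] * n
--     dp[n - 1] = 0  # raises IndexError on the empty list, like A
--     for i in range(n - 2, -1, -1):
--         reach = arr[i]
--         if reach > 0:
--             m = max(dp[i + 1:i + reach + 1], default=-1)
--             if m >= 0: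
--                 dp[i] = m + 1
--     return dp[0]
-- ===== Notes on version B (the rewrite author's own statement) =====
-- stated objective: alternative
-- what changed: Replaces the top-down memoized DFS (recursion + dict) by a right-to-left bottom-up DP over a plain table, computing each cell as 1 + max of a window slice of already-final dp values; Pre_ excludes only the empty list, on which both A and B raise IndexError.
import Mathlib
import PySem

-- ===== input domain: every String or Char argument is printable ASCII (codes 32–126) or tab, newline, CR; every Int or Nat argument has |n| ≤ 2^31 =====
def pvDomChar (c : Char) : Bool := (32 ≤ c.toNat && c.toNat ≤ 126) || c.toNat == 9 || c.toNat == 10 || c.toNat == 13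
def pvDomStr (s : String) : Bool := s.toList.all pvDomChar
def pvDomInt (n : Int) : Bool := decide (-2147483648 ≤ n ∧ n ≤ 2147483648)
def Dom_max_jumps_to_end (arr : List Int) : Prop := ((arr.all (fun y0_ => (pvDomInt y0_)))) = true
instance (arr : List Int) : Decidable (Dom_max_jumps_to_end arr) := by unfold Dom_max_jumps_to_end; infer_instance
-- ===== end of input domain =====

-- B replaces A's top-down memoized DFS by a right-to-left bottom-up table DP (window slice + max);
-- return values agree on every non-empty list (both raise IndexError on []).

-- ===== PORT A =====
-- A's inner `dfs` with the memo dict threaded through; the Nat argument is recursion fuel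
-- (the entry point supplies arr.length + 1, which the proofs show is always sufficient).
def dfsA (arr : List Int) (n : Int) : Nat → Int → PySem.Dict Int Int → Int × PySem.Dict Int Int
  | 0, _, memo => (-1, memo)
  | fuel+1, i, memo =>
    if i = n - 1 then (0, memo)
    else
      match PySem.Dict.get? memo i with
      | some v => (v, memo)
      | none =>
        -- arr[i]: in range on every call A makes (Pre_ excludes the empty list)
        let r : Int := (PySem.List.pyGet? arr i).getD 0
        let res := (PySem.List.pyRange (i+1) (min n (i + r + 1)) 1).foldl
          (fun (acc : Int × PySem.Dict Int Int) j =>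
            let p := dfsA arr n fuel j acc.2
            (if p.1 ≠ -1 then max acc.1 (1 + p.1) else acc.1, p.2))
          (-1, memo)
        (res.1, res.2.insert i res.1)

def max_jumps_to_end (arr : List Int) : Int :=
  (dfsA arr (arr.length : Int) (arr.length + 1) 0 PySem.Dict.empty).1

-- ===== PORT B =====
-- the body of B's for-loop: reach = arr[i]; if reach > 0: m = max(dp[i+1:i+reach+1], default=-1); if m >= 0: dp[i] = m+1
def stepAlt (arr : List Int) (dp : List Int) (i : Int) : List Int :=
  let reach : Int := PySem.List.pyGetD arr i 0
  if reach > 0 then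
    let m : Int := (PySem.List.max? (PySem.List.slice dp (some (i+1)) (some (i+reach+1))) (fun x => x)).getD (-1)
    if m ≥ 0 then dp.set i.toNat (m + 1) else dp
  else dp

def max_jumps_to_end_alt (arr : List Int) : Int :=
  let n : Int := arr.length
  let dp0 := (List.replicate n.toNat (-1 : Int)).set (n - 1).toNat 0  -- dp = [-1]*n; dp[n-1] = 0
  let dp := (PySem.List.pyRange (n - 2) (-1) (-1)).foldl (stepAlt arr) dp0
  PySem.List.pyGetD dp 0 0

-- ===== PRECONDITION & SPEC =====
-- Pre_ excludes only the empty list, on which A (and B) raise IndexError.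
def Pre_max_jumps_to_end (arr : List Int) : Prop := arr ≠ []
instance (arr : List Int) : Decidable (Pre_max_jumps_to_end arr) := by unfold Pre_max_jumps_to_end; infer_instance
def pvWitness_max_jumps_to_end : List Int := [2, 1, 0, 1, 0]
def Spec_max_jumps_to_end (arr : List Int) (out : Int) : Prop := out = max_jumps_to_end_alt arr
instance (arr : List Int) (out : Int) : Decidable (Spec_max_jumps_to_end arr out) := by unfold Spec_max_jumps_to_end; infer_instance

-- ===== CLAIM (what is proved, stated in full; the proofs are below) =====
def Claim_equal_max_jumps_to_end : Prop := ∀ (arr : List Int), Dom_max_jumps_to_end arr → Pre_max_jumps_to_end arr → Spec_max_jumps_to_end arr (max_jumps_to_end arr)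

-- ===== LEMMAS AND PROOFS =====

-- The common specification: the value A's dfs(i) computes, as a memo-free recursion.
def jumpsF (arr : List Int) (i : Int) : Int :=
  if i = (arr.length : Int) - 1 then 0
  else
    ((PySem.List.pyRange (i+1) (min (arr.length : Int) (i + (PySem.List.pyGet? arr i).getD 0 + 1)) 1).attach.foldl
      (fun mj j => if jumpsF arr j.1 ≠ -1 then max mj (1 + jumpsF arr j.1) else mj) (-1))
termination_by ((arr.length : Int) - i).toNat
decreasing_by
  have h := PySem.List.mem_pyRange_one.mp j.2
  omega

theorem foldl_ge {α : Type} (g : Int → α → Int) (h : ∀ a x, a ≤ g a x) :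
    ∀ (l : List α) (a : Int), a ≤ l.foldl g a := by
  intro l
  induction l with
  | nil => intro a; simp
  | cons x t ih => intro a; exact le_trans (h a x) (ih (g a x))

theorem jumpsF_ge (arr : List Int) (i : Int) : -1 ≤ jumpsF arr i := by
  rw [jumpsF]
  split
  · omega
  · exact foldl_ge _ (by intro a x; split <;> simp) _ (-1)

-- the memo invariant
def InvA (arr : List Int) (memo : PySem.Dict Int Int) : Prop :=
  ∀ k v, memo.get? k = some v → v = jumpsF arr k

theorem dfsA_correct (arr : List Int) :
    ∀ (fuel : Nat) (i : Int) (memo : PySem.Dict Int Int),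
      InvA arr memo → ((arr.length : Int) - 1 - i).toNat < fuel →
      (dfsA arr (arr.length : Int) fuel i memo).1 = jumpsF arr i ∧
        InvA arr (dfsA arr (arr.length : Int) fuel i memo).2 := by
  intro fuel
  induction fuel with
  | zero => intro i memo _ h; omega
  | succ fuel ih =>
    intro i memo hinv hb
    rw [dfsA]
    by_cases hi : i = (arr.length : Int) - 1
    · rw [if_pos hi]
      refine ⟨?_, hinv⟩
      rw [jumpsF, if_pos hi]
    · rw [if_neg hi]
      cases hm : PySem.Dict.get? memo i with
      | some v =>
        refine ⟨?_, ?_⟩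
        · show v = jumpsF arr i
          exact hinv i v hm
        · show InvA arr memo
          exact hinv
      | none =>
        have key : ∀ (l : List Int), (∀ j ∈ l, i < j ∧ j < (arr.length : Int)) →
            ∀ (a : Int) (m0 : PySem.Dict Int Int), InvA arr m0 →
            (l.foldl (fun (acc : Int × PySem.Dict Int Int) j =>
                let p := dfsA arr (arr.length : Int) fuel j acc.2
                (if p.1 ≠ -1 then max acc.1 (1 + p.1) else acc.1, p.2)) (a, m0)).1
              = l.foldl (fun mj j => if jumpsF arr j ≠ -1 then max mj (1 + jumpsF arr j) else mj) a
            ∧ InvA arr ((l.foldl (fun (acc : Int × PySem.Dict Int Int) j =>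
                let p := dfsA arr (arr.length : Int) fuel j acc.2
                (if p.1 ≠ -1 then max acc.1 (1 + p.1) else acc.1, p.2)) (a, m0)).2) := by
          intro l
          induction l with
          | nil => intro _ a m0 hm0; exact ⟨rfl, hm0⟩
          | cons j t iht =>
            intro hmem a m0 hm0
            have hj := hmem j (by simp)
            have hfb : ((arr.length : Int) - 1 - j).toNat < fuel := by omega
            have hrec := ih j m0 hm0 hfb
            simp only [List.foldl_cons]
            rw [hrec.1]
            exact iht (fun x hx => hmem x (by simp [hx])) _ _ hrec.2
        have hmem : ∀ j ∈ PySem.List.pyRange (i+1)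
            (min (arr.length : Int) (i + (PySem.List.pyGet? arr i).getD 0 + 1)) 1,
            i < j ∧ j < (arr.length : Int) := by
          intro j hj
          have := PySem.List.mem_pyRange_one.mp hj
          omega
        have hk := key _ hmem (-1) memo hinv
        refine ⟨?_, ?_⟩
        · rw [hk.1, jumpsF, if_neg hi]
          exact (List.foldl_attach (f := fun mj j => if jumpsF arr j ≠ -1 then max mj (1 + jumpsF arr j) else mj)).symm
        · intro k v hv
          rw [PySem.Dict.get?_insert] at hv
          split_ifs at hv with hk'
          · cases hv
            rw [hk', hk.1, jumpsF, if_neg hi]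
            exact (List.foldl_attach (f := fun mj j => if jumpsF arr j ≠ -1 then max mj (1 + jumpsF arr j) else mj)).symm
          · exact hk.2 k v hv

-- encode/fold-max lemma: A's skip-(-1) max loop is B's "max of window + 1"
def encB (b : Int) : Int := if b ≥ 0 then b + 1 else -1

theorem fold_enc :
    ∀ (l : List Int), (∀ x ∈ l, -1 ≤ x) →
    ∀ a b : Int, -1 ≤ b → a = encB b →
      l.foldl (fun mj s => if s ≠ -1 then max mj (1 + s) else mj) a
        = encB (l.foldl max b) := by
  intro l
  induction l with
  | nil => intro _ a b _ hab; simpa using hab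
  | cons x t ih =>
    intro hl a b hb hab
    have hx : -1 ≤ x := hl x (by simp)
    have step : (if x ≠ -1 then max a (1 + x) else a) = encB (max b x) := by
      subst hab
      unfold encB
      split_ifs <;> omega
    simp only [List.foldl_cons]
    rw [step]
    exact ih (fun y hy => hl y (by simp [hy])) _ _ (by omega) rfl

theorem max?_getD_eq_foldl (l : List Int) (hl : ∀ x ∈ l, -1 ≤ x) :
    ((PySem.List.max? l (fun x => x)).getD (-1)) = l.foldl max (-1) := by
  cases l with
  | nil => simp [PySem.List.max?]
  | cons x t =>
    have hx : -1 ≤ x := hl x (by simp)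
    rw [PySem.List.max?_id_cons]
    simp only [List.foldl_cons, Option.getD_some]
    have : max (-1) x = x := by omega
    rw [this]

def GoodB (arr : List Int) (t : Nat) (dp : List Int) : Prop :=
  dp.length = arr.length ∧
    (∀ k : Nat, t ≤ k → k < arr.length → dp.getD k 0 = jumpsF arr k) ∧
    (∀ k : Nat, k < t → dp.getD k 0 = -1)

theorem stepB (arr : List Int) (t : Nat) (dp : List Int)
    (ht : t + 2 ≤ arr.length) (hg : GoodB arr (t+1) dp) :
    GoodB arr t (stepAlt arr dp (t : Int)) := by
  obtain ⟨hlen, hup, hlo⟩ := hg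
  have hne : ((t : Nat) : Int) ≠ (arr.length : Int) - 1 := by omega
  have hreach : PySem.List.pyGetD arr (t : Int) 0 = arr.getD t 0 :=
    PySem.List.pyGetD_natCast arr t 0
  have hreach' : (PySem.List.pyGet? arr (t : Int)).getD 0 = arr.getD t 0 := hreach
  by_cases hpos : arr.getD t 0 > 0
  · -- reach > 0
    have h0 : (0:Int) ≤ (t : Int) + 1 := by omega
    have h1 : (0:Int) ≤ (t : Int) + arr.getD t 0 + 1 := by omega
    -- the window of already-final dp values is the spec values on the jump range
    have hwin : PySem.List.slice dp (some ((t : Int)+1)) (some ((t : Int) + arr.getD t 0 + 1))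
        = (PySem.List.pyRange ((t : Int)+1)
            (min (arr.length : Int) ((t : Int) + arr.getD t 0 + 1)) 1).map (jumpsF arr) := by
      rw [PySem.List.slice_toNat dp h0 h1]
      apply List.ext_getElem
      · simp only [List.length_take, List.length_drop, hlen, List.length_map,
          PySem.List.length_pyRange_one]
        omega
      · intro k hk1 hk2
        have hkl : ((t : Int)+1).toNat + k < arr.length := by
          simp only [List.length_take, List.length_drop, hlen] at hk1
          omega
        have hdrop : (List.take (((t : Int) + arr.getD t 0 + 1).toNat - ((t : Int)+1).toNat)
            (List.drop ((t : Int)+1).toNat dp))[k]'hk1 = dp[((t : Int)+1).toNat + k]'(by rw [hlen]; exact hkl) := by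
          rw [List.getElem_take, List.getElem_drop]
        rw [hdrop]
        have hget : dp[((t : Int)+1).toNat + k]'(by rw [hlen]; exact hkl)
            = dp.getD (((t : Int)+1).toNat + k) 0 := by
          rw [List.getD_eq_getElem?_getD, List.getElem?_eq_getElem (by rw [hlen]; exact hkl)]
          rfl
        rw [hget, hup (((t : Int)+1).toNat + k) (by omega) hkl]
        simp only [List.getElem_map, PySem.List.getElem_pyRange_one]
        have hc : ((((t : Int) + 1).toNat + k : Nat) : Int) = (t : Int) + 1 + (k : Int) := by omega
        rw [hc]
    have hmem : ∀ x ∈ (PySem.List.pyRange ((t : Int)+1)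
        (min (arr.length : Int) ((t : Int) + arr.getD t 0 + 1)) 1).map (jumpsF arr), -1 ≤ x := by
      intro x hx
      obtain ⟨j, _, rfl⟩ := List.mem_map.mp hx
      exact jumpsF_ge arr j
    -- the spec value at t is encB of the window max
    have hFt : jumpsF arr (t : Int)
        = encB ((PySem.List.slice dp (some ((t : Int)+1))
            (some ((t : Int) + arr.getD t 0 + 1))).foldl max (-1)) := by
      rw [jumpsF, if_neg hne, hreach']
      rw [List.foldl_attach (f := fun mj j => if jumpsF arr j ≠ -1 then max mj (1 + jumpsF arr j) else mj)]
      rw [← List.foldl_map (f := jumpsF arr)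
        (g := fun mj s => if s ≠ -1 then max mj (1 + s) else mj)]
      rw [← hwin]
      exact fold_enc _ (by rw [hwin]; exact hmem) (-1) (-1) (by omega) (by simp [encB])
    have hM := PySem.List.le_foldl_max ((PySem.List.slice dp (some ((t : Int)+1))
        (some ((t : Int) + arr.getD t 0 + 1)))) (-1 : Int)
    have hmax : (PySem.List.max? (PySem.List.slice dp (some ((t : Int)+1))
        (some ((t : Int) + arr.getD t 0 + 1))) (fun x => x)).getD (-1)
        = (PySem.List.slice dp (some ((t : Int)+1))
            (some ((t : Int) + arr.getD t 0 + 1))).foldl max (-1) :=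
      max?_getD_eq_foldl _ (by rw [hwin]; exact hmem)
    simp only [stepAlt, hreach, if_pos hpos, hmax]
    set M := (PySem.List.slice dp (some ((t : Int)+1))
        (some ((t : Int) + arr.getD t 0 + 1))).foldl max (-1) with hMdef
    by_cases hM0 : M ≥ 0
    · rw [if_pos hM0]
      have htt : ((t : Nat) : Int).toNat = t := by omega
      rw [htt]
      refine ⟨by rw [List.length_set]; exact hlen, ?_, ?_⟩
      · intro k hk1 hk2
        by_cases hkt : k = t
        · subst hkt
          rw [List.getD_eq_getElem?_getD, List.getElem?_set, if_pos rfl,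
            if_pos (by rw [hlen]; omega)]
          rw [hFt]
          simp only [encB, if_pos hM0, Option.getD_some]
        · rw [List.getD_eq_getElem?_getD, List.getElem?_set, if_neg (fun h => hkt h.symm),
            ← List.getD_eq_getElem?_getD]
          exact hup k (by omega) hk2
      · intro k hk
        rw [List.getD_eq_getElem?_getD, List.getElem?_set, if_neg (by omega),
          ← List.getD_eq_getElem?_getD]
        exact hlo k (by omega)
    · rw [if_neg hM0]
      have hMm1 : M = -1 := by omega
      refine ⟨hlen, ?_, ?_⟩
      · intro k hk1 hk2
        by_cases hkt : k = t
        · subst hkt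
          rw [hlo k (by omega), hFt, hMm1]
          simp [encB]
        · exact hup k (by omega) hk2
      · intro k hk
        exact hlo k (by omega)
  · -- reach <= 0: no jump is possible from t, dp is unchanged and the spec value is -1
    have hFt : jumpsF arr (t : Int) = -1 := by
      rw [jumpsF, if_neg hne, hreach']
      rw [PySem.List.pyRange_one_eq_nil (by omega)]
      simp
    simp only [stepAlt, hreach, if_neg hpos]
    refine ⟨hlen, ?_, ?_⟩
    · intro k hk1 hk2
      by_cases hkt : k = t
      · subst hkt
        rw [hlo k (by omega), hFt]
      · exact hup k (by omega) hk2
    · intro k hk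
      exact hlo k (by omega)

theorem loopB (arr : List Int) :
    ∀ (t : Nat), t < arr.length → ∀ dp, GoodB arr t dp →
      GoodB arr 0 ((PySem.List.pyRange ((t : Int) - 1) (-1) (-1)).foldl (stepAlt arr) dp) := by
  intro t
  induction t with
  | zero =>
    intro _ dp hg
    rw [PySem.List.pyRange_neg_one_eq_nil (by omega)]
    exact hg
  | succ t ih =>
    intro ht dp hg
    have hc : ((t+1 : Nat) : Int) - 1 = (t : Int) := by push_cast; ring
    rw [hc, PySem.List.pyRange_neg_one_cons (by omega), List.foldl_cons]
    exact ih (by omega) _ (stepB arr t dp (by omega) hg)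

theorem altB_correct (arr : List Int) (h : arr ≠ []) :
    max_jumps_to_end_alt arr = jumpsF arr 0 := by
  have hn : 1 ≤ arr.length := by
    cases arr with
    | nil => exact absurd rfl h
    | cons x t => simp
  have hg0 : GoodB arr (arr.length - 1)
      ((List.replicate ((arr.length : Int)).toNat (-1 : Int)).set (((arr.length : Int)) - 1).toNat 0) := by
    refine ⟨by simp, ?_, ?_⟩
    · intro k hk1 hk2
      have hkk : k = arr.length - 1 := by omega
      subst hkk
      rw [List.getD_eq_getElem?_getD, List.getElem?_set, if_pos (by omega),
        if_pos (by simp; omega)]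
      have : ((arr.length - 1 : Nat) : Int) = (arr.length : Int) - 1 := by omega
      rw [this, jumpsF, if_pos rfl]
      rfl
    · intro k hk
      rw [List.getD_eq_getElem?_getD, List.getElem?_set, if_neg (by omega),
        List.getElem?_replicate, if_pos (by omega)]
      rfl
  have hl := loopB arr (arr.length - 1) (by omega) _ hg0
  have hc : ((arr.length - 1 : Nat) : Int) - 1 = (arr.length : Int) - 2 := by omega
  rw [hc] at hl
  obtain ⟨hlen, hup, _⟩ := hl
  show PySem.List.pyGetD _ 0 0 = jumpsF arr 0
  have h0 : ((0 : Nat) : Int) = (0 : Int) := rfl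
  rw [← h0, PySem.List.pyGetD_natCast]
  exact hup 0 (by omega) (by omega)

-- ===== VERDICT (by name: the statement is the Claim_ definition above) =====
theorem max_jumps_to_end_spec : Claim_equal_max_jumps_to_end := by
  intro arr _ hpre
  unfold Spec_max_jumps_to_end
  have hA := dfsA_correct arr (arr.length + 1) 0 PySem.Dict.empty
    (by intro k v hv; simp [PySem.Dict.get?_empty] at hv) (by omega)
  have : max_jumps_to_end arr = jumpsF arr 0 := hA.1
  rw [this, altB_correct arr hpre]
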